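-- pv_equiv track=rewrite | github.com/LBNL-ETA/AFC | afc/radiance/maps.py | make_ctrl_map
-- ===== SOURCE A (Python) =====
-- import itertools
--
-- def generate_dependent_combinations_table(variables, values):
--     """make progressive table for shades."""
--     if not values:
--         return []
--
--     table = []
--
--     def generate_row(index, current_row):
--         """process row"""
--         if index == variables:
--             table.append(current_row[:])
--             return
--         for value in values:
--             if not current_row or value >= current_row[-1]:
--                 current_row.append(value)
--                 generate_row(index + 1, current_row)
--                 current_row.pop()
--
--     generate_row(0, [])
--     return table
--
-- def make_ctrl_map(mode, states, window_subdivs, window_zones):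
--     """make the control map."""
--     # states per window
--     states_per_window = dict(enumerate(states))
--
--     # window actuation map
--     window_act_map = {}
--     # for window in range(window_zones if mode == 'ec' else 1):
--     for window in range(window_subdivs):
--         window_act_map[window] = list(states_per_window.values())
--
--     # window control map
--     window_ctrl_map = {}
--     if mode == 'ec':
--         windows_per_zone = int(window_subdivs / window_zones)
--         logic_map = list(itertools.product(*([states] * window_zones)))
--         ctrl_msp = [list(itertools.chain.from_iterable([[ss]*windows_per_zone for ss in l]))
--             for l in logic_map]
--     elif mode == 'shade':
--         ctrl_msp = generate_dependent_combinations_table(window_subdivs, states_per_window.keys())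
--         ctrl_msp = [[states_per_window[v] for v in l] for l in ctrl_msp[::-1]]
--     elif mode in ['blinds', 'tc']:
--         windows_per_zone = window_subdivs
--         logic_map = list(itertools.product(*([states] * 1)))
--         ctrl_msp = [list(itertools.chain.from_iterable([[ss]*windows_per_zone for ss in l]))
--             for l in logic_map]
--     else:
--         raise ValueError(f'Glazing system not implemented: {mode}')
--
--     window_ctrl_map = dict(enumerate(ctrl_msp))
--     return window_ctrl_map
-- ===== SOURCE B (Python) =====
-- import itertools
--
-- def make_ctrl_map(mode, states, window_subdivs, window_zones):
--     """make the control map (idiomatic rewrite: library combinatorics, no hand-rolled DFS)."""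
--     if mode == 'ec':
--         wpz = int(window_subdivs / window_zones)
--         rows = [[s for s in combo for _ in range(wpz)]
--                 for combo in itertools.product(states, repeat=window_zones)]
--     elif mode == 'shade':
--         if not states:
--             rows = []
--         else:
--             combos = itertools.combinations_with_replacement(range(len(states)), window_subdivs)
--             rows = [[states[v] for v in c] for c in reversed(list(combos))]
--     elif mode in ('blinds', 'tc'):
--         return {i: [s] * window_subdivs for i, s in enumerate(states)}
--     else:
--         raise ValueError(f'Glazing system not implemented: {mode}')
--     return dict(enumerate(rows))
-- ===== Notes on version B (the rewrite author's own statement) =====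
-- stated objective: idiomatic
-- what changed: The hand-rolled recursive DFS helper for the shade branch is replaced by itertools.combinations_with_replacement over the state indices, the ec rows are built by a flat comprehension instead of chain.from_iterable of replicated lists, and the blinds/tc branch becomes a direct dict comprehension with no itertools.product over a single list.
-- outside the precondition, e.g. on make_ctrl_map('ec', [1], 2, -1): A returns {0: []}, B raises ValueError
import Mathlib
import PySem

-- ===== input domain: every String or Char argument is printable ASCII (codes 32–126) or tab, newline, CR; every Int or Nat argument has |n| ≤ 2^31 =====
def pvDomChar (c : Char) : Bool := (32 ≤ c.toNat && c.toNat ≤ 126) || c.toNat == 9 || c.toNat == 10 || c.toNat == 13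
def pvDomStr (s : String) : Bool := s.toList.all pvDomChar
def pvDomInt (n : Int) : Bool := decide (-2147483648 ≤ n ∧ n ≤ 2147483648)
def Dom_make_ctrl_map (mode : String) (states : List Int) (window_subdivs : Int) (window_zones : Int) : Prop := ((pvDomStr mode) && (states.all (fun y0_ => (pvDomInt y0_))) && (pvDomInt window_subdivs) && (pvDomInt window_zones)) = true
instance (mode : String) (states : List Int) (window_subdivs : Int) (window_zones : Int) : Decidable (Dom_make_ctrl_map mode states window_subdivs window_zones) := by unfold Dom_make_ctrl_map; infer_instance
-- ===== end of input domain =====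

-- B is an idiomatic rewrite: the recursive DFS table builder becomes combinations_with_replacement,
-- the blinds/tc branch becomes a direct dict comprehension; return values proved equal on Pre_.

-- ===== PORT A =====

-- itertools.product(*([s]*n)) (also itertools.product(s, repeat=n)): leftmost factor varies slowest
def pvProdRepeat (s : List Int) : Nat → List (List Int)
  | 0 => [[]]
  | n + 1 => s.flatMap (fun a => (pvProdRepeat s n).map (a :: ·))

-- the guard 'not current_row or value >= current_row[-1]'
def pvCond (cur : List Int) (v : Int) : Bool :=
  match cur.getLast? with
  | none => true
  | some w => w ≤ v

-- A's inner recursive generate_row (fuel = variables - index, so index is implicit);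
-- appends to `table` become list concatenation of the recursive results
def pvGenRow (values : List Int) : Nat → List Int → List (List Int)
  | 0, cur => [cur]
  | n + 1, cur =>
      values.flatMap (fun v => if pvCond cur v then pvGenRow values n (cur ++ [v]) else [])

-- generate_dependent_combinations_table; fuel variables.toNat is faithful for variables ≥ 0
-- (on variables < 0 with nonempty values the Python recurses forever — excluded by Pre_)
def pvGenTable (nvars : Int) (values : List Int) : List (List Int) :=
  if values = [] then [] else pvGenRow values nvars.toNat []

def make_ctrl_map (mode : String) (states : List Int) (window_subdivs : Int) (window_zones : Int) : List (Int × List Int) :=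
  -- states_per_window = dict(enumerate(states)); window_act_map is built but never read, omitted
  let spw : PySem.Dict Int Int := PySem.Dict.ofList (PySem.List.enumerate states)
  let ctrl_msp : List (List Int) :=
    if mode = "ec" then
      -- int(a / b) = truncated quotient (exact: |a|,|b| ≤ 2^31 keeps the float division's
      -- truncation equal to the exact truncated quotient)
      let wpz := window_subdivs.tdiv window_zones
      (pvProdRepeat states window_zones.toNat).map
        (fun l => l.flatMap (fun ss => List.replicate wpz.toNat ss))
    else if mode = "shade" then
      (pvGenTable window_subdivs spw.keys).reverse.map
        (fun l => l.map (fun v => (spw.get? v).getD 0))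
    else if mode = "blinds" ∨ mode = "tc" then
      let wpz := window_subdivs
      (pvProdRepeat states 1).map
        (fun l => l.flatMap (fun ss => List.replicate wpz.toNat ss))
    else []  -- raise ValueError — excluded by Pre_
  PySem.List.enumerate ctrl_msp

-- ===== PORT B =====

-- itertools.combinations_with_replacement(pool, r): nondecreasing selections, lexicographic
def pvCwr : List Int → Nat → List (List Int)
  | _, 0 => [[]]
  | [], _ + 1 => []
  | a :: rest, r + 1 => ((pvCwr (a :: rest) r).map (a :: ·)) ++ pvCwr rest (r + 1)
  termination_by pool r => (r, pool.length)

def make_ctrl_map_alt (mode : String) (states : List Int) (window_subdivs : Int) (window_zones : Int) : List (Int × List Int) :=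
  if mode = "ec" then
    let wpz := window_subdivs.tdiv window_zones
    PySem.List.enumerate
      ((pvProdRepeat states window_zones.toNat).map
        (fun combo => combo.flatMap (fun s => (PySem.List.pyRange 0 wpz 1).map (fun _ => s))))
  else if mode = "shade" then
    PySem.List.enumerate
      (if states = [] then []
       else
         (pvCwr (PySem.List.pyRange 0 states.length 1) window_subdivs.toNat).reverse.map
           (fun c => c.map (fun v => PySem.List.pyGetD states v 0)))
  else if mode = "blinds" ∨ mode = "tc" then
    (PySem.List.enumerate states).map (fun p => (p.1, List.replicate window_subdivs.toNat p.2))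
  else []  -- raise ValueError — excluded by Pre_

-- ===== PRECONDITION & SPEC =====
-- Pre_ excludes: unknown modes (A raises ValueError); mode 'ec' with window_zones = 0
-- (A raises ZeroDivisionError) or window_zones < 0 (A returns the accidental {0: []} that
-- falls out of [states]*negative, where B's product(states, repeat=window_zones) itself
-- raises ValueError); mode 'shade' with nonempty states and window_subdivs < 0 (A's
-- recursion never reaches the stop index: RecursionError).
def Pre_make_ctrl_map (mode : String) (states : List Int) (window_subdivs : Int) (window_zones : Int) : Prop :=
  if mode = "ec" then 1 ≤ window_zones
  else if mode = "shade" then states = [] ∨ 0 ≤ window_subdivs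
  else mode = "blinds" ∨ mode = "tc"
instance (mode : String) (states : List Int) (window_subdivs : Int) (window_zones : Int) : Decidable (Pre_make_ctrl_map mode states window_subdivs window_zones) := by unfold Pre_make_ctrl_map; infer_instance

def pvWitness_make_ctrl_map : String × List Int × Int × Int := ("shade", [3, 7], 2, 1)

def Spec_make_ctrl_map (mode : String) (states : List Int) (window_subdivs : Int) (window_zones : Int) (out : List (Int × List Int)) : Prop := out = make_ctrl_map_alt mode states window_subdivs window_zones
instance (mode : String) (states : List Int) (window_subdivs : Int) (window_zones : Int) (out : List (Int × List Int)) : Decidable (Spec_make_ctrl_map mode states window_subdivs window_zones out) := by unfold Spec_make_ctrl_map; infer_instance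

-- ===== CLAIM (what is proved, stated in full; the proofs are below) =====
def Claim_equal_make_ctrl_map : Prop := ∀ (mode : String) (states : List Int) (window_subdivs : Int) (window_zones : Int), Dom_make_ctrl_map mode states window_subdivs window_zones → Pre_make_ctrl_map mode states window_subdivs window_zones → Spec_make_ctrl_map mode states window_subdivs window_zones (make_ctrl_map mode states window_subdivs window_zones)

-- ===== LEMMAS AND PROOFS =====

-- [s]*n = [s for _ in range(n)]
lemma map_const_range (m : Nat) (s : Int) :
    (List.range m).map (fun _ => s) = List.replicate m s := by
  induction m with
  | zero => rfl
  | succ m ih => rw [List.range_succ, List.map_append, ih, List.replicate_succ']; rfl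

lemma replicate_eq_map_pyRange (n : Int) (s : Int) :
    List.replicate n.toNat s = (PySem.List.pyRange 0 n 1).map (fun _ => s) := by
  rw [PySem.List.pyRange_one]
  simp only [sub_zero, List.map_map]
  exact (map_const_range n.toNat s).symm

-- enumerate(map f xs) = map over enumerate(xs)
lemma enumerate_map (f : Int → List Int) (xs : List Int) (s : Int) :
    PySem.List.enumerate (xs.map f) s
      = (PySem.List.enumerate xs s).map (fun p => (p.1, f p.2)) := by
  induction xs generalizing s with
  | nil => simp [PySem.List.enumerate_nil]
  | cons x xs ih => simp [PySem.List.enumerate_cons, ih]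

-- dict(enumerate(states)): items
lemma items_ofList_enumerate (states : List Int) :
    (PySem.Dict.ofList (PySem.List.enumerate states) : PySem.Dict Int Int).items
      = PySem.List.enumerate states := by
  have h := PySem.Dict.items_foldl_insert_fresh (PySem.List.enumerate states)
      (fun p => p.1) (fun p => p.2) (PySem.Dict.empty : PySem.Dict Int Int)
      (by intro a _; exact PySem.Dict.contains_empty a.1)
      (by
        have := PySem.List.map_fst_enumerate states (0 : Int)
        simp only [this]
        exact PySem.List.nodup_pyRange_one 0 (0 + states.length))
  simpa using h

lemma nodup_keys_ofList_enumerate (states : List Int) :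
    (PySem.Dict.ofList (PySem.List.enumerate states) : PySem.Dict Int Int).keys.Nodup := by
  show ((PySem.Dict.ofList (PySem.List.enumerate states) : PySem.Dict Int Int).items.map (·.1)).Nodup
  rw [items_ofList_enumerate]
  have := PySem.List.map_fst_enumerate states (0 : Int)
  simp only [this]
  exact PySem.List.nodup_pyRange_one 0 (0 + states.length)

lemma keys_ofList_enumerate (states : List Int) :
    (PySem.Dict.ofList (PySem.List.enumerate states) : PySem.Dict Int Int).keys
      = PySem.List.pyRange 0 states.length 1 := by
  show (PySem.Dict.ofList (PySem.List.enumerate states) : PySem.Dict Int Int).items.map (·.1)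
      = PySem.List.pyRange 0 states.length 1
  rw [items_ofList_enumerate]
  have := PySem.List.map_fst_enumerate states (0 : Int)
  simpa using this

lemma getD_ofList_enumerate (states : List Int) (v : Int) (h0 : 0 ≤ v) (h1 : v < states.length) :
    (((PySem.Dict.ofList (PySem.List.enumerate states) : PySem.Dict Int Int).get? v).getD 0)
      = PySem.List.pyGetD states v 0 := by
  have hk : v.toNat < states.length := by omega
  have hmem : ((v, states[v.toNat]) : Int × Int) ∈ PySem.List.enumerate states := by
    rw [PySem.List.mem_enumerate_iff]
    exact ⟨v.toNat, hk, by simp; omega⟩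
  have hget : (PySem.Dict.ofList (PySem.List.enumerate states) : PySem.Dict Int Int).get? v
      = some states[v.toNat] := by
    apply PySem.Dict.get?_of_mem_items
    · rw [items_ofList_enumerate]; exact hmem
    · exact nodup_keys_ofList_enumerate states
  have hv : ((v.toNat : Int)) = v := Int.toNat_of_nonneg h0
  rw [hget]
  conv_rhs => rw [← hv]
  rw [PySem.List.pyGetD_natCast]
  simp [List.getD_eq_getElem, hk]

-- pushing an if _ then _ else [] through flatMap
lemma flatMap_ite_nil {a b : Type} (l : List a) (p : a -> Bool) (f : a -> List b) :
    (l.flatMap fun v => if p v then f v else []) = (l.filter p).flatMap f := by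
  induction l with
  | nil => simp
  | cons x l ih => by_cases h : p x <;> simp [List.filter_cons, h, ih]

-- cwr over a strictly sorted pool, unfolded one level as a filter
lemma cwr_succ_sorted (pool : List Int) (hp : pool.Pairwise (· < ·)) (k : Nat) :
    pvCwr pool (k + 1)
      = pool.flatMap (fun v => (pvCwr (pool.filter (fun u => v ≤ u)) k).map (v :: ·)) := by
  induction pool with
  | nil => simp [pvCwr]
  | cons a rest ih =>
    have ha : ∀ b ∈ rest, a < b := fun b hb => List.rel_of_pairwise_cons hp hb
    have hrest : rest.Pairwise (· < ·) := hp.of_cons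
    have hfa : (a :: rest).filter (fun u => a ≤ u) = a :: rest := by
      rw [List.filter_cons]
      simp only [le_refl, decide_true, if_true]
      congr 1
      exact List.filter_eq_self.mpr (fun b hb => by simp [le_of_lt (ha b hb)])
    have htail : rest.flatMap (fun v => (pvCwr ((a :: rest).filter (fun u => v ≤ u)) k).map (v :: ·))
        = rest.flatMap (fun v => (pvCwr (rest.filter (fun u => v ≤ u)) k).map (v :: ·)) := by
      apply List.flatMap_congr
      intro v hv
      have : (a :: rest).filter (fun u => v ≤ u) = rest.filter (fun u => v ≤ u) := by
        rw [List.filter_cons]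
        simp [not_le.mpr (ha v hv)]
      rw [this]
    rw [List.flatMap_cons, hfa, htail, ← ih hrest]
    rw [pvCwr]

-- A's DFS = cwr of the admissible suffix, prefixed by the current row
lemma genRow_eq_cwr (values : List Int) (hv : values.Pairwise (· < ·)) (k : Nat) (cur : List Int) :
    pvGenRow values k cur
      = (pvCwr (values.filter (fun v => pvCond cur v)) k).map (cur ++ ·) := by
  induction k generalizing cur with
  | zero => simp [pvGenRow, pvCwr]
  | succ k ih =>
    rw [pvGenRow, flatMap_ite_nil]
    set F := values.filter (fun v => pvCond cur v) with hF
    have hFsorted : F.Pairwise (· < ·) := hv.filter _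
    rw [cwr_succ_sorted F hFsorted k, List.map_flatMap]
    apply List.flatMap_congr
    intro v hvF
    have hcondv : pvCond cur v = true := (List.mem_filter.mp hvF).2
    have hlast : pvCond (cur ++ [v]) = fun u => decide (v ≤ u) := by
      funext u
      simp [pvCond, List.getLast?_concat]
    have hfilter : F.filter (fun u => v ≤ u) = values.filter (fun u => v ≤ u) := by
      rw [hF, List.filter_filter]
      apply List.filter_congr
      intro u _
      by_cases hvu : v ≤ u
      · have : pvCond cur u = true := by
          unfold pvCond at hcondv ⊢
          cases h : cur.getLast? with
          | none => rfl
          | some w =>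
            rw [h] at hcondv
            simp at hcondv ⊢
            omega
        simp [hvu, this]
      · simp [hvu]
    rw [ih (cur ++ [v]), hlast, hfilter, List.map_map]
    congr 1
    funext t
    simp

-- product(xs, repeat=1) is one singleton per element
lemma prodRepeat_one (xs : List Int) : pvProdRepeat xs 1 = xs.map (fun a => [a]) := by
  simp only [pvProdRepeat]
  induction xs with
  | nil => rfl
  | cons a t ih => rw [List.flatMap_cons, ih]; rfl

-- every entry of a cwr row comes from the pool
lemma mem_of_mem_cwr (pool : List Int) (r : Nat) (c : List Int) (hc : c ∈ pvCwr pool r)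
    (v : Int) (hv : v ∈ c) : v ∈ pool := by
  induction pool, r using pvCwr.induct generalizing c with
  | case1 pool =>
    simp [pvCwr] at hc
    subst hc
    simp at hv
  | case2 r =>
    simp [pvCwr] at hc
  | case3 a rest r ih1 ih2 =>
    rw [pvCwr] at hc
    rcases List.mem_append.mp hc with h | h
    · obtain ⟨c', hc', rfl⟩ := List.mem_map.mp h
      rcases List.mem_cons.mp hv with rfl | hv'
      · exact List.mem_cons_self
      · exact ih1 c' hc' hv'
    · exact List.mem_cons_of_mem a (ih2 c h hv)

-- ===== VERDICT (by name: the statement is the Claim_ definition above) =====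
theorem make_ctrl_map_spec : Claim_equal_make_ctrl_map := by
  intro mode states ws wz _hdom hpre
  unfold Spec_make_ctrl_map make_ctrl_map make_ctrl_map_alt
  by_cases hec : mode = "ec"
  · simp only [hec, if_true, reduceIte]
    simp only [replicate_eq_map_pyRange]
  · by_cases hsh : mode = "shade"
    · simp only [if_neg hec, if_pos hsh]
      by_cases hnil : states = []
      · subst hnil
        simp [pvGenTable,
          show (PySem.Dict.ofList ([] : List (Int × Int))).keys = [] from rfl,
          PySem.List.enumerate_nil]
      · simp only [hnil, if_false, reduceIte]
        rw [keys_ofList_enumerate]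
        have hn : (0 : Int) < states.length := by
          cases states with
          | nil => exact absurd rfl hnil
          | cons x xs => simp
        have hpool : PySem.List.pyRange 0 (states.length : Int) 1 ≠ [] := by
          rw [PySem.List.pyRange_one_cons hn]
          simp
        have hsorted := PySem.List.pairwise_lt_pyRange_one 0 (states.length : Int)
        unfold pvGenTable
        rw [if_neg hpool, genRow_eq_cwr _ hsorted]
        have hcondnil : (PySem.List.pyRange 0 (states.length : Int) 1).filter
            (fun v => pvCond [] v) = PySem.List.pyRange 0 (states.length : Int) 1 := by
          apply List.filter_eq_self.mpr
          intro b _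
          rfl
        rw [hcondnil]
        have hid : List.map (fun x => [] ++ x)
              (pvCwr (PySem.List.pyRange 0 (states.length : Int) 1) ws.toNat)
            = pvCwr (PySem.List.pyRange 0 (states.length : Int) 1) ws.toNat := by
          simp
        rw [hid]
        congr 1
        apply List.map_congr_left
        intro c hc
        have hc' : c ∈ pvCwr (PySem.List.pyRange 0 (states.length : Int) 1) ws.toNat :=
          List.mem_reverse.mp hc
        apply List.map_congr_left
        intro v hvc
        have hvpool := mem_of_mem_cwr _ _ c hc' v hvc
        rw [PySem.List.mem_pyRange_one] at hvpool
        exact getD_ofList_enumerate states v hvpool.1 hvpool.2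
    · by_cases hbt : mode = "blinds" ∨ mode = "tc"
      · simp only [if_neg hec, if_neg hsh, if_pos hbt]
        rw [prodRepeat_one, List.map_map]
        have h2 : ((fun l : List Int => l.flatMap fun ss => List.replicate ws.toNat ss)
              ∘ fun a : Int => [a])
            = fun a : Int => List.replicate ws.toNat a := by
          funext a
          simp
        rw [h2, enumerate_map]
      · exfalso
        unfold Pre_make_ctrl_map at hpre
        rw [if_neg hec, if_neg hsh] at hpre
        exact hbt hpre
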